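-- pv_equiv track=rewrite | github.com/cicerocasj/codility | loft.py | solution
-- ===== SOURCE A (Python) =====
-- from collections import Counter
--
-- def solution(A):
--     n_elements = Counter(A)
--     if len(n_elements) == 1:
--         return False
--     ordered_list = sorted(A)
--     count_index = len(ordered_list) - 1  # because start with 0
--
--     for i, current_value in enumerate(ordered_list):
--         if i < count_index:
--             next_value = ordered_list[i + 1]
--             if next_value - current_value == 1:
--                 return True
--     return False
-- ===== SOURCE B (Python) =====
-- def solution(A):
--     s = set(A)
--     return bool(s & {x + 1 for x in s})
-- ===== Notes on version B (the rewrite author's own statement) =====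
-- stated objective: simpler
-- what changed: Replaces Counter + sort + adjacent-pair scan with a set intersection: the value set is intersected with the shifted value set, so the answer is non-emptiness of S & {x+1 for x in S}.
import Mathlib
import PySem

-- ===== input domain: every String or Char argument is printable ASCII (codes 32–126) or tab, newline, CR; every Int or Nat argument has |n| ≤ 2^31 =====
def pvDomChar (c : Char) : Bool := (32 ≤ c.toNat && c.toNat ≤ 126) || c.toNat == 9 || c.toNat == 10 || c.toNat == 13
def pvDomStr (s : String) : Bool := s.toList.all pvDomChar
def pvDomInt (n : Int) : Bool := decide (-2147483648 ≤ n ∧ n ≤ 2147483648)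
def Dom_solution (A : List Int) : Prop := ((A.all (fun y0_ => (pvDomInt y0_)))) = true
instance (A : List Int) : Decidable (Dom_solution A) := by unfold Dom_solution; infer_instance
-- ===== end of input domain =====

-- B replaces Counter + sort + adjacent-pair scan by a set intersection with the shifted value set (simpler).

-- ===== PORT A =====
def solution (A : List Int) : Bool :=
  let n_elements := PySem.Dict.counter A
  if n_elements.size == 1 then false
  else
    let ordered_list := PySem.List.sorted A (fun x => x) false
    let count_index : Int := (ordered_list.length : Int) - 1
    (PySem.List.enumerate ordered_list).any (fun p =>
      if p.1 < count_index then
        match PySem.List.pyGet? ordered_list (p.1 + 1) with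
        | some next_value => next_value - p.2 == 1
        | none => false
      else false)

-- ===== PORT B =====
def solution_alt (A : List Int) : Bool :=
  let s : PySem.Set Int := PySem.Set.ofList A
  let shifted : PySem.Set Int := PySem.Set.ofList (s.map (· + 1))
  !(PySem.Set.inter s shifted).isEmpty

-- ===== PRECONDITION & SPEC =====
def Spec_solution (A : List Int) (out : Bool) : Prop := out = solution_alt A
instance (A : List Int) (out : Bool) : Decidable (Spec_solution A out) := by unfold Spec_solution; infer_instance

-- ===== CLAIM (what is proved, stated in full; the proofs are below) =====
def Claim_equal_solution : Prop := ∀ (A : List Int), Dom_solution A → Spec_solution A (solution A)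

-- ===== LEMMAS AND PROOFS =====

-- B's value characterised: some value of A has its successor in A
theorem alt_iff (A : List Int) :
    solution_alt A = true ↔ ∃ x, x ∈ A ∧ x + 1 ∈ A := by
  simp only [solution_alt, Bool.not_eq_eq_eq_not, Bool.not_true,
    List.isEmpty_eq_false_iff_exists_mem]
  constructor
  · rintro ⟨y, hy⟩
    obtain ⟨h1, h2⟩ := (PySem.Set.mem_inter _ _ _).mp hy
    rw [PySem.Set.mem_ofList, List.mem_map] at h2
    obtain ⟨x, hx, rfl⟩ := h2
    rw [PySem.Set.mem_ofList] at h1 hx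
    exact ⟨x, hx, h1⟩
  · rintro ⟨x, hx, hx1⟩
    refine ⟨x + 1, (PySem.Set.mem_inter _ _ _).mpr ⟨?_, ?_⟩⟩
    · rw [PySem.Set.mem_ofList]; exact hx1
    · rw [PySem.Set.mem_ofList, List.mem_map]
      exact ⟨x, by rw [PySem.Set.mem_ofList]; exact hx, rfl⟩

-- a ≤-sorted list containing both x and x+1 has an adjacent pair with difference 1
theorem adj_of_mem (x : Int) :
    ∀ (L : List Int), L.Pairwise (· ≤ ·) → x ∈ L → x + 1 ∈ L →
      ∃ k : Nat, ∃ h : k + 1 < L.length, L[k + 1] - L[k] = 1 := by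
  intro L
  induction L with
  | nil => simp
  | cons a t ih =>
    intro hp hx hx1
    obtain ⟨hale, hpt⟩ := List.pairwise_cons.mp hp
    by_cases hxa : x = a
    · subst hxa
      have hx1t : x + 1 ∈ t := by
        rcases List.mem_cons.mp hx1 with h | h
        · omega
        · exact h
      cases t with
      | nil => simp at hx1t
      | cons b t' =>
        have hxb : x ≤ b := hale b List.mem_cons_self
        have hbx1 : b ≤ x + 1 := by
          rcases List.mem_cons.mp hx1t with h | h
          · omega
          · exact (List.pairwise_cons.mp hpt).1 _ h
        by_cases hb : b = x + 1
        · exact ⟨0, by simp, by simp [hb]⟩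
        · have hbx : b = x := by omega
          obtain ⟨k, hk, hke⟩ := ih hpt (by simp [hbx]) hx1t
          exact ⟨k + 1, by simpa using Nat.succ_lt_succ hk, by simpa using hke⟩
    · have hxt : x ∈ t := by
        rcases List.mem_cons.mp hx with h | h
        · exact absurd h hxa
        · exact h
      have hx1t : x + 1 ∈ t := by
        rcases List.mem_cons.mp hx1 with h | h
        · have := hale x hxt; omega
        · exact h
      obtain ⟨k, hk, hke⟩ := ih hpt hxt hx1t
      exact ⟨k + 1, by simpa using Nat.succ_lt_succ hk, by simpa using hke⟩

-- A's enumerate/any loop characterised by indices into the sorted list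
theorem loop_iff (L : List Int) :
    ((PySem.List.enumerate L).any (fun p =>
       if p.1 < (L.length : Int) - 1 then
         match PySem.List.pyGet? L (p.1 + 1) with
         | some next_value => next_value - p.2 == 1
         | none => false
       else false)) = true
    ↔ ∃ k : Nat, ∃ h : k + 1 < L.length, L[k + 1] - L[k] = 1 := by
  rw [List.any_eq_true]
  constructor
  · rintro ⟨p, hp, hcond⟩
    obtain ⟨k, hk, rfl⟩ := (PySem.List.mem_enumerate_iff _ _ _).mp hp
    simp only [] at hcond
    split_ifs at hcond with hlt
    · have hk1 : k + 1 < L.length := by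
        simp at hlt; omega
      have : PySem.List.pyGet? L ((0 : Int) + k + 1) = some L[k + 1] := by
        have : ((0:Int) + k + 1) = ((k + 1 : Nat) : Int) := by omega
        rw [this, PySem.List.pyGet?_natCast, List.getElem?_eq_getElem hk1]
      rw [this] at hcond
      simp at hcond
      exact ⟨k, hk1, by omega⟩
  · rintro ⟨k, hk1, hke⟩
    refine ⟨((0:Int) + k, L[k]), (PySem.List.mem_enumerate_iff _ _ _).mpr ⟨k, by omega, rfl⟩, ?_⟩
    simp only []
    have hlt : (0:Int) + k < (L.length : Int) - 1 := by omega
    rw [if_pos hlt]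
    have : PySem.List.pyGet? L ((0:Int) + k + 1) = some L[k + 1] := by
      have h2 : ((0:Int) + k + 1) = ((k + 1 : Nat) : Int) := by omega
      rw [h2, PySem.List.pyGet?_natCast, List.getElem?_eq_getElem hk1]
    rw [this]
    simp; omega

-- A's value characterised the same way
theorem a_iff (A : List Int) :
    solution A = true ↔ ∃ x, x ∈ A ∧ x + 1 ∈ A := by
  simp only [solution]
  by_cases hsz : (PySem.Dict.counter A).size == 1
  · rw [if_pos hsz]
    have hsz' : (PySem.Dict.counter A).size = 1 := by simpa using hsz
    have hlen : (PySem.Set.ofList A).length = 1 := by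
      have hk := congrArg List.length (PySem.Dict.keys_counter (xs := A))
      simp [PySem.Dict.keys, PySem.Dict.size] at hk hsz'
      omega
    obtain ⟨c, hc⟩ := List.length_eq_one_iff.mp hlen
    constructor
    · intro h; exact absurd h (by simp)
    · rintro ⟨x, hx, hx1⟩
      have h1 : x = c := by
        have := (PySem.Set.mem_ofList (xs := A) (y := x)).mpr hx
        rw [hc] at this; simpa using this
      have h2 : x + 1 = c := by
        have := (PySem.Set.mem_ofList (xs := A) (y := x + 1)).mpr hx1
        rw [hc] at this; simpa using this
      omega
  · rw [if_neg hsz, loop_iff]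
    constructor
    · rintro ⟨k, hk1, hke⟩
      refine ⟨(PySem.List.sorted A (fun x => x) false)[k], ?_, ?_⟩
      · exact (PySem.List.mem_sorted _ _ _ _).mp (List.getElem_mem _)
      · have : (PySem.List.sorted A (fun x => x) false)[k] + 1
             = (PySem.List.sorted A (fun x => x) false)[k + 1] := by omega
        rw [this]
        exact (PySem.List.mem_sorted _ _ _ _).mp (List.getElem_mem _)
    · rintro ⟨x, hx, hx1⟩
      have hp : (PySem.List.sorted A (fun x => x) false).Pairwise (· ≤ ·) := by
        simpa using PySem.List.sorted_pairwise (xs := A) (key := fun x => x)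
      exact adj_of_mem x _ hp ((PySem.List.mem_sorted _ _ _ _).mpr hx)
        ((PySem.List.mem_sorted _ _ _ _).mpr hx1)

-- ===== VERDICT (by name: the statement is the Claim_ definition above) =====
theorem solution_spec : Claim_equal_solution := by
  intro A _
  unfold Spec_solution
  have h := (a_iff A).trans (alt_iff A).symm
  cases hA : solution A <;> cases hB : solution_alt A <;> simp_all
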